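-- pv_equiv track=rewrite | github.com/matkuki/ExCo | components.py | generate_square_grid_list
-- ===== SOURCE A (Python) =====
-- def generate_square_grid_list(row_length, count):
--     row_counter = 1
--     grid_list = []
--     direction = False
--     add_down_step = False
--     for i in range(count-1):
--         if add_down_step == True:
--             add_down_step = False
--             grid_list.append((3, True))
--         elif direction == True:
--             if (row_counter % 2) == 0:
--                 grid_list.append((4, True))
--             else:
--                 grid_list.append((5, True))
--             row_counter -= 1
--             if row_counter == 1:
--                 add_down_step = True
--                 direction = False
--         else:
--             if (row_counter % 2) == 0:
--                 grid_list.append((2, True))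
--             else:
--                 grid_list.append((1, True))
--             row_counter += 1
--             if row_counter == row_length:
--                 add_down_step = True
--                 direction = True
--     return grid_list
-- ===== SOURCE B (Python) =====
-- def generate_square_grid_list(row_length, count):
--     target = count - 1
--     result = []
--     while len(result) < target:
--         # rightward sweep: row_counter climbs from 1
--         rc = 1
--         while len(result) < target:
--             result.append((1, True) if rc % 2 == 1 else (2, True))
--             rc += 1
--             if rc == row_length:
--                 break
--         if len(result) >= target:
--             break
--         result.append((3, True))
--         # leftward sweep: row_counter falls from row_length to 2
--         rc = row_length
--         while len(result) < target and rc > 1: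
--             result.append((5, True) if rc % 2 == 1 else (4, True))
--             rc -= 1
--         if len(result) >= target:
--             break
--         result.append((3, True))
--     return result
-- ===== Notes on version B (the rewrite author's own statement) =====
-- stated objective: simpler
-- what changed: Replaced A's single flag-driven state machine (direction/add_down_step booleans updated per iteration) with explicit alternating phase loops: a rightward sweep, a down step, a leftward sweep, a down step, repeated until count-1 elements are emitted.
import Mathlib
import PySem

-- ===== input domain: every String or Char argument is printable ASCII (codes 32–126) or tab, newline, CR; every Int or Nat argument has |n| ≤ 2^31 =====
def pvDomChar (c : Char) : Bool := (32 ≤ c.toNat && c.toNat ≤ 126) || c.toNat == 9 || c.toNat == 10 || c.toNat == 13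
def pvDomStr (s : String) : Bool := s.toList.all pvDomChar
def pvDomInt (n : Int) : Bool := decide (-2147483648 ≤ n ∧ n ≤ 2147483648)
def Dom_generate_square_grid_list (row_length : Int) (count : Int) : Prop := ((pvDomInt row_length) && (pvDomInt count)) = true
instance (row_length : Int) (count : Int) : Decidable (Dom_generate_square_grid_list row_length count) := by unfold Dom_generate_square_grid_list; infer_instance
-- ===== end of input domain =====

-- B replaces A's single flag-driven state machine (direction/add_down_step booleans) by explicit
-- alternating phase loops (rightward sweep, down step, leftward sweep, down step); objective: simpler.

-- ===== PORT A =====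
-- loop body of A's `for i in range(count-1)` over state (row_counter, grid_list, direction, add_down_step)
def aStep (row_length : Int) (st : Int × List (Int × Bool) × Bool × Bool) :
    Int × List (Int × Bool) × Bool × Bool :=
  let rc := st.1; let gl := st.2.1; let dir := st.2.2.1; let ads := st.2.2.2
  if ads then
    (rc, gl ++ [((3 : Int), true)], dir, false)
  else if dir then
    let gl' := if PySem.Int.mod rc 2 == 0 then gl ++ [((4 : Int), true)] else gl ++ [((5 : Int), true)]
    let rc' := rc - 1
    if rc' == 1 then (rc', gl', false, true) else (rc', gl', dir, ads)
  else
    let gl' := if PySem.Int.mod rc 2 == 0 then gl ++ [((2 : Int), true)] else gl ++ [((1 : Int), true)]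
    let rc' := rc + 1
    if rc' == row_length then (rc', gl', true, true) else (rc', gl', dir, ads)

def generate_square_grid_list (row_length : Int) (count : Int) : List (Int × Bool) :=
  ((PySem.List.pyRange 0 (count - 1) 1).foldl (fun st _ => aStep row_length st)
    (1, [], false, false)).2.1

-- ===== PORT B =====
-- fuel = number of elements still to emit (B's `len(result) < target` checks)
mutual
-- rightward sweep: emit by parity of rc, break into a down step + leftward sweep when rc+1 hits row_length
def altRight (row_length rc : Int) : Nat → List (Int × Bool)
  | 0 => []
  | n + 1 =>
    (if PySem.Int.mod rc 2 == 1 then ((1 : Int), true) else ((2 : Int), true)) ::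
      (if rc + 1 == row_length then altDownLeft row_length n else altRight row_length (rc + 1) n)
-- down step after the rightward sweep, then leftward sweep from row_length
def altDownLeft (row_length : Int) : Nat → List (Int × Bool)
  | 0 => []
  | n + 1 => ((3 : Int), true) :: altLeft row_length row_length n
-- leftward sweep: `while … rc > 1`; on exit a down step then a fresh rightward sweep from 1
def altLeft (row_length rc : Int) : Nat → List (Int × Bool)
  | 0 => []
  | n + 1 =>
    if rc > 1 then
      (if PySem.Int.mod rc 2 == 1 then ((5 : Int), true) else ((4 : Int), true)) ::
        altLeft row_length (rc - 1) n
    else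
      ((3 : Int), true) :: altRight row_length 1 n
end

def generate_square_grid_list_alt (row_length : Int) (count : Int) : List (Int × Bool) :=
  altRight row_length 1 (count - 1).toNat

-- ===== PRECONDITION & SPEC =====
def Spec_generate_square_grid_list (row_length : Int) (count : Int) (out : List (Int × Bool)) : Prop := out = generate_square_grid_list_alt row_length count
instance (row_length : Int) (count : Int) (out : List (Int × Bool)) : Decidable (Spec_generate_square_grid_list row_length count out) := by unfold Spec_generate_square_grid_list; infer_instance

-- ===== CLAIM (what is proved, stated in full; the proofs are below) =====
def Claim_equal_generate_square_grid_list : Prop := ∀ (row_length : Int) (count : Int), Dom_generate_square_grid_list row_length count → Spec_generate_square_grid_list row_length count (generate_square_grid_list row_length count)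

-- ===== LEMMAS AND PROOFS =====

-- the list of elements A's loop emits in n iterations from state (rc, dir, ads)
def runA (L : Int) : Nat → Int × Bool × Bool → List (Int × Bool)
  | 0, _ => []
  | n + 1, (rc, dir, ads) =>
    if ads then ((3 : Int), true) :: runA L n (rc, dir, false)
    else if dir then
      (if PySem.Int.mod rc 2 == 0 then ((4 : Int), true) else ((5 : Int), true)) ::
        runA L n (if rc - 1 == 1 then (rc - 1, false, true) else (rc - 1, true, false))
    else
      (if PySem.Int.mod rc 2 == 0 then ((2 : Int), true) else ((1 : Int), true)) ::
        runA L n (if rc + 1 == L then (rc + 1, true, true) else (rc + 1, false, false))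

lemma foldA_runA (L : Int) (l : List Int) :
    ∀ (rc : Int) (gl : List (Int × Bool)) (dir ads : Bool),
      ((l.foldl (fun st _ => aStep L st) (rc, gl, dir, ads)).2.1 : List (Int × Bool)) =
        gl ++ runA L l.length (rc, dir, ads) := by
  induction l with
  | nil => intro rc gl dir ads; simp [runA]
  | cons x l ih =>
    intro rc gl dir ads
    rw [List.foldl_cons]
    cases ads with
    | true =>
      have h : aStep L (rc, gl, dir, true) = (rc, gl ++ [((3 : Int), true)], dir, false) := by
        simp [aStep]
      rw [h, ih]
      simp [runA]
    | false =>
      have hm : PySem.Int.mod rc 2 = rc % 2 := PySem.Int.mod_eq_emod_of_pos (by omega)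
      cases dir with
      | true =>
        by_cases hp : rc % 2 = 0 <;> by_cases h1 : rc - 1 = 1
        · have h : aStep L (rc, gl, true, false) =
              (rc - 1, gl ++ [((4 : Int), true)], false, true) := by simp [aStep, hp, h1]
          rw [h, ih]; simp [runA, hp, h1]
        · have h : aStep L (rc, gl, true, false) =
              (rc - 1, gl ++ [((4 : Int), true)], true, false) := by simp [aStep, hp, h1]
          rw [h, ih]; simp [runA, hp, h1]
        · have h : aStep L (rc, gl, true, false) =
              (rc - 1, gl ++ [((5 : Int), true)], false, true) := by simp [aStep, hp, h1]
          rw [h, ih]; simp [runA, hp, h1]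
        · have h : aStep L (rc, gl, true, false) =
              (rc - 1, gl ++ [((5 : Int), true)], true, false) := by simp [aStep, hp, h1]
          rw [h, ih]; simp [runA, hp, h1]
      | false =>
        by_cases hp : rc % 2 = 0 <;> by_cases hL : rc + 1 = L
        · have h : aStep L (rc, gl, false, false) =
              (rc + 1, gl ++ [((2 : Int), true)], true, true) := by simp [aStep, hp, hL]
          rw [h, ih]; simp [runA, hp, hL]
        · have h : aStep L (rc, gl, false, false) =
              (rc + 1, gl ++ [((2 : Int), true)], false, false) := by simp [aStep, hp, hL]
          rw [h, ih]; simp [runA, hp, hL]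
        · have h : aStep L (rc, gl, false, false) =
              (rc + 1, gl ++ [((1 : Int), true)], true, true) := by simp [aStep, hp, hL]
          rw [h, ih]; simp [runA, hp, hL]
        · have h : aStep L (rc, gl, false, false) =
              (rc + 1, gl ++ [((1 : Int), true)], false, false) := by simp [aStep, hp, hL]
          rw [h, ih]; simp [runA, hp, hL]

lemma mod_two_cases (rc : Int) : PySem.Int.mod rc 2 = 0 ∨ PySem.Int.mod rc 2 = 1 := by
  have h0 := PySem.Int.mod_nonneg rc (b := 2) (by omega)
  have h1 := PySem.Int.mod_lt rc (b := 2) (by omega)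
  omega

lemma parity_flip_12 (rc : Int) :
    (if PySem.Int.mod rc 2 == 0 then ((2 : Int), true) else ((1 : Int), true)) =
      (if PySem.Int.mod rc 2 == 1 then ((1 : Int), true) else ((2 : Int), true)) := by
  rcases mod_two_cases rc with h | h <;> rw [h] <;> simp

lemma parity_flip_45 (rc : Int) :
    (if PySem.Int.mod rc 2 == 0 then ((4 : Int), true) else ((5 : Int), true)) =
      (if PySem.Int.mod rc 2 == 1 then ((5 : Int), true) else ((4 : Int), true)) := by
  rcases mod_two_cases rc with h | h <;> rw [h] <;> simp

lemma runA_eq_alt (L : Int) (n : Nat) :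
    (∀ rc : Int, 1 ≤ rc → runA L n (rc, false, false) = altRight L rc n) ∧
    (2 ≤ L → runA L n (L, true, true) = altDownLeft L n) ∧
    (∀ rc : Int, 2 ≤ rc → runA L n (rc, true, false) = altLeft L rc n) ∧
    (runA L n (1, false, true) = altLeft L 1 n) := by
  induction n with
  | zero => simp [runA, altRight, altDownLeft, altLeft]
  | succ n ih =>
    obtain ⟨ihR, ihDL, ihL, ihDR⟩ := ih
    refine ⟨?_, ?_, ?_, ?_⟩
    · intro rc hrc
      simp only [runA, altRight, Bool.false_eq_true, if_false, parity_flip_12]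
      by_cases hL : rc + 1 = L
      · have hb : (rc + 1 == L) = true := by simpa using hL
        rw [if_pos hb, if_pos hb, hL]
        exact congrArg _ (ihDL (by omega))
      · have hb : ¬ ((rc + 1 == L) = true) := by simpa using hL
        rw [if_neg hb, if_neg hb]
        exact congrArg _ (ihR (rc + 1) (by omega))
    · intro hL2
      simp only [runA, altDownLeft, if_pos]
      exact congrArg _ (ihL L hL2)
    · intro rc hrc
      have hgt : rc > 1 := by omega
      simp only [runA, altLeft, Bool.false_eq_true, if_false, parity_flip_45]
      rw [if_pos hgt]
      by_cases h1 : rc - 1 = 1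
      · have hb : (rc - 1 == 1) = true := by simpa using h1
        rw [if_pos hb, h1]
        exact congrArg _ ihDR
      · have hb : ¬ ((rc - 1 == 1) = true) := by simpa using h1
        rw [if_neg hb]
        exact congrArg _ (ihL (rc - 1) (by omega))
    · have hng : ¬ ((1 : Int) > 1) := by omega
      simp only [runA, altLeft]
      rw [if_neg hng]
      simp only [if_pos]
      exact congrArg _ (ihR 1 (by omega))

-- ===== VERDICT (by name: the statement is the Claim_ definition above) =====
theorem generate_square_grid_list_spec : Claim_equal_generate_square_grid_list := by
  intro L c _
  unfold Spec_generate_square_grid_list generate_square_grid_list generate_square_grid_list_alt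
  rw [foldA_runA, PySem.List.length_pyRange_one]
  simp only [List.nil_append, sub_zero]
  exact (runA_eq_alt L (c - 1).toNat).1 1 (by omega)
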